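-- pv_equiv track=rewrite | github.com/yin-ziyun0208/RCI_code | code/core/pfaf.py | build_prefixes_by_level
-- ===== SOURCE A (Python) =====
-- from typing import Dict, Iterable, List, Optional, Set, Tuple
--
-- def build_prefixes_by_level(
--     full_codes: Iterable[str],
--     max_level: Optional[int] = None,
-- ) -> Dict[int, List[str]]:
--     """Build the unique Pfaf prefix set at each level from the full code table."""
--     normalized_codes = sorted({str(code) for code in full_codes if str(code)})
--     if not normalized_codes:
--         return {}
--
--     max_code_length = max(len(code) for code in normalized_codes)
--     if max_level is not None:
--         max_code_length = min(max_code_length, max_level)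
--
--     return {
--         level: sorted({code[:level] for code in normalized_codes if len(code) >= level})
--         for level in range(1, max_code_length + 1)
--     }
-- ===== SOURCE B (Python) =====
-- from collections import defaultdict
--
-- def build_prefixes_by_level(full_codes, max_level=None):
--     """Single pass over full_codes building a per-level prefix index."""
--     buckets = defaultdict(set)
--     for code in full_codes:
--         s = str(code)
--         if not s:
--             continue
--         cap = len(s) if max_level is None else min(len(s), max_level)
--         for level in range(1, cap + 1):
--             buckets[level].add(s[:level])
--     return {level: sorted(buckets[level]) for level in sorted(buckets)}
-- ===== Notes on version B (the rewrite author's own statement) =====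
-- stated objective: alternative
-- what changed: Replaces the per-level re-scan of all normalized codes (one set comprehension per level) with a single pass over full_codes that drops each code's prefixes into per-level set buckets, then sorts each bucket once.
import Mathlib
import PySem

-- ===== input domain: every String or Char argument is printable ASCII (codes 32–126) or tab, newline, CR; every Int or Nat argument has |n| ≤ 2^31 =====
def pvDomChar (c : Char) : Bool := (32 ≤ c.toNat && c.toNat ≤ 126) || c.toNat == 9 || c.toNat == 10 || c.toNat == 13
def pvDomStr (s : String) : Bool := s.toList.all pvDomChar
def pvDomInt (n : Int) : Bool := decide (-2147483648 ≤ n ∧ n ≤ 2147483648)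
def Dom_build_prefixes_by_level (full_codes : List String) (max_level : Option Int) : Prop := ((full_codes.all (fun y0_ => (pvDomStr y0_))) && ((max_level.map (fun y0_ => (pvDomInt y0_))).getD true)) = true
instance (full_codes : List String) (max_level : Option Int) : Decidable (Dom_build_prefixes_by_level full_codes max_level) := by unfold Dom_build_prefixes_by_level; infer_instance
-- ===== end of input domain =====

-- B replaces A's per-level re-scan of the normalized codes with a single pass over
-- full_codes building per-level prefix-set buckets, sorted once at the end (objective: alternative).

-- ===== PORT A =====
-- str(code) is the identity on strings; 'if str(code)' keeps the non-empty ones.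
def build_prefixes_by_level (full_codes : List String) (max_level : Option Int) : List (Int × List String) :=
  let normalized := PySem.List.sorted (PySem.Set.ofList (full_codes.filter (fun c => !(c == "")))) (fun x => x)
  if normalized = [] then []
  else
    let mcl0 : Int := (PySem.List.max? (normalized.map (fun c => PySem.Str.len c)) (fun x => x)).getD 0
    let mcl : Int := match max_level with
      | none => mcl0
      | some ml => min mcl0 ml
    (PySem.List.pyRange 1 (mcl + 1)).map (fun level =>
      (level,
        PySem.List.sorted
          (PySem.Set.ofList
            ((normalized.filter (fun c => decide (level ≤ PySem.Str.len c))).map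
              (fun c => PySem.Str.slice c none (some level))))
          (fun x => x)))

-- ===== PORT B =====
-- len(s) if max_level is None else min(len(s), max_level)
def bplCap (max_level : Option Int) (s : String) : Int :=
  match max_level with
  | none => PySem.Str.len s
  | some ml => min (PySem.Str.len s) ml

-- the body of B's outer 'for code in full_codes' loop: drop each prefix into its level bucket
def bplStep (max_level : Option Int) (d : PySem.Dict Int (List String)) (s : String) : PySem.Dict Int (List String) :=
  if s = "" then d
  else
    (PySem.List.pyRange 1 (bplCap max_level s + 1)).foldl
      (fun d level => d.modify level [] (fun st => PySem.Set.add st (PySem.Str.slice s none (some level)))) d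

def build_prefixes_by_level_alt (full_codes : List String) (max_level : Option Int) : List (Int × List String) :=
  let buckets := full_codes.foldl (bplStep max_level) PySem.Dict.empty
  (PySem.List.sorted buckets.keys (fun x => x)).map (fun level =>
    (level, PySem.List.sorted (buckets.getD level []) (fun x => x)))

-- ===== PRECONDITION & SPEC =====
def Spec_build_prefixes_by_level (full_codes : List String) (max_level : Option Int) (out : List (Int × List String)) : Prop := out = build_prefixes_by_level_alt full_codes max_level
instance (full_codes : List String) (max_level : Option Int) (out : List (Int × List String)) : Decidable (Spec_build_prefixes_by_level full_codes max_level out) := by unfold Spec_build_prefixes_by_level; infer_instance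

-- ===== CLAIM (what is proved, stated in full; the proofs are below) =====
def Claim_equal_build_prefixes_by_level : Prop := ∀ (full_codes : List String) (max_level : Option Int), Dom_build_prefixes_by_level full_codes max_level → Spec_build_prefixes_by_level full_codes max_level (build_prefixes_by_level full_codes max_level)

-- ===== LEMMAS AND PROOFS =====

-- membership in a bucket after the inner per-code level loop
theorem bpl_inner_mem (L : List Int) (s : String) (d : PySem.Dict Int (List String)) (l : Int) (x : String) :
    x ∈ (L.foldl (fun d level => d.modify level [] (fun st => PySem.Set.add st (PySem.Str.slice s none (some level)))) d).getD l []
      ↔ x ∈ d.getD l [] ∨ (l ∈ L ∧ x = PySem.Str.slice s none (some l)) := by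
  induction L generalizing d with
  | nil => simp
  | cons a L ih =>
    simp only [List.foldl_cons, ih, List.mem_cons]
    by_cases h : l = a
    · subst h
      rw [PySem.Dict.getD_modify_self, PySem.Set.mem_add]
      tauto
    · rw [PySem.Dict.getD_modify, if_neg h]
      tauto

-- bucket Nodup is preserved by the inner loop
theorem bpl_inner_nodup (L : List Int) (s : String) (d : PySem.Dict Int (List String))
    (h : ∀ k, (d.getD k []).Nodup) :
    ∀ k, ((L.foldl (fun d level => d.modify level [] (fun st => PySem.Set.add st (PySem.Str.slice s none (some level)))) d).getD k []).Nodup := by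
  induction L generalizing d with
  | nil => exact h
  | cons a L ih =>
    intro k
    simp only [List.foldl_cons]
    refine ih _ (fun k' => ?_) k
    by_cases hk : k' = a
    · subst hk
      rw [PySem.Dict.getD_modify_self]
      exact PySem.Set.nodup_add _ _ (h k')
    · rw [PySem.Dict.getD_modify, if_neg hk]
      exact h k'

-- membership in a bucket after the whole pass
theorem bpl_outer_mem (cs : List String) (ml : Option Int) (d : PySem.Dict Int (List String)) (l : Int) (x : String) :
    x ∈ (cs.foldl (bplStep ml) d).getD l []
      ↔ x ∈ d.getD l [] ∨ ∃ c ∈ cs, c ≠ "" ∧ 1 ≤ l ∧ l ≤ bplCap ml c ∧ x = PySem.Str.slice c none (some l) := by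
  induction cs generalizing d with
  | nil => simp
  | cons c cs ih =>
    simp only [List.foldl_cons, ih, List.mem_cons]
    unfold bplStep
    by_cases hc : c = ""
    · simp only [if_pos hc]
      constructor
      · rintro (h | h)
        · exact Or.inl h
        · exact Or.inr (by obtain ⟨y, hy, rest⟩ := h; exact ⟨y, Or.inr hy, rest⟩)
      · rintro (h | ⟨y, (rfl | hy), hne, rest⟩)
        · exact Or.inl h
        · exact absurd hc hne
        · exact Or.inr ⟨y, hy, hne, rest⟩
    · simp only [if_neg hc]
      rw [bpl_inner_mem]
      have hr : l ∈ PySem.List.pyRange 1 (bplCap ml c + 1) ↔ 1 ≤ l ∧ l ≤ bplCap ml c := by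
        rw [PySem.List.mem_pyRange_one]; omega
      rw [hr]
      constructor
      · rintro ((h | ⟨⟨h1, h2⟩, hx⟩) | h)
        · exact Or.inl h
        · exact Or.inr ⟨c, Or.inl rfl, hc, h1, h2, hx⟩
        · exact Or.inr (by obtain ⟨y, hy, rest⟩ := h; exact ⟨y, Or.inr hy, rest⟩)
      · rintro (h | ⟨y, (rfl | hy), hne, h1, h2, hx⟩)
        · exact Or.inl (Or.inl h)
        · exact Or.inl (Or.inr ⟨⟨h1, h2⟩, hx⟩)
        · exact Or.inr ⟨y, hy, hne, h1, h2, hx⟩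

theorem bpl_outer_nodup (cs : List String) (ml : Option Int) (d : PySem.Dict Int (List String))
    (h : ∀ k, (d.getD k []).Nodup) :
    ∀ k, ((cs.foldl (bplStep ml) d).getD k []).Nodup := by
  induction cs generalizing d with
  | nil => exact h
  | cons c cs ih =>
    intro k
    simp only [List.foldl_cons]
    refine ih _ (fun k' => ?_) k
    unfold bplStep
    by_cases hc : c = ""
    · simp only [if_pos hc]; exact h k'
    · simp only [if_neg hc]; exact bpl_inner_nodup _ _ _ h k'

-- keys present after the whole pass
theorem bpl_keys_mem (cs : List String) (ml : Option Int) (d : PySem.Dict Int (List String)) (l : Int) :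
    l ∈ (cs.foldl (bplStep ml) d).keys
      ↔ l ∈ d.keys ∨ ∃ c ∈ cs, c ≠ "" ∧ 1 ≤ l ∧ l ≤ bplCap ml c := by
  induction cs generalizing d with
  | nil => simp
  | cons c cs ih =>
    simp only [List.foldl_cons, ih, List.mem_cons]
    unfold bplStep
    by_cases hc : c = ""
    · simp only [if_pos hc]
      constructor
      · rintro (h | h)
        · exact Or.inl h
        · exact Or.inr (by obtain ⟨y, hy, rest⟩ := h; exact ⟨y, Or.inr hy, rest⟩)
      · rintro (h | ⟨y, (rfl | hy), hne, rest⟩)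
        · exact Or.inl h
        · exact absurd hc hne
        · exact Or.inr ⟨y, hy, hne, rest⟩
    · simp only [if_neg hc]
      rw [PySem.Dict.keys_foldl_modify, PySem.Set.mem_update]
      have hr : l ∈ PySem.List.pyRange 1 (bplCap ml c + 1) ↔ 1 ≤ l ∧ l ≤ bplCap ml c := by
        rw [PySem.List.mem_pyRange_one]; omega
      rw [hr]
      constructor
      · rintro ((h | ⟨h1, h2⟩) | h)
        · exact Or.inl h
        · exact Or.inr ⟨c, Or.inl rfl, hc, h1, h2⟩
        · exact Or.inr (by obtain ⟨y, hy, rest⟩ := h; exact ⟨y, Or.inr hy, rest⟩)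
      · rintro (h | ⟨y, (rfl | hy), hne, h1, h2⟩)
        · exact Or.inl (Or.inl h)
        · exact Or.inl (Or.inr ⟨h1, h2⟩)
        · exact Or.inr ⟨y, hy, hne, h1, h2⟩

theorem bpl_keys_nodup (cs : List String) (ml : Option Int) (d : PySem.Dict Int (List String))
    (h : d.keys.Nodup) : (cs.foldl (bplStep ml) d).keys.Nodup := by
  induction cs generalizing d with
  | nil => exact h
  | cons c cs ih =>
    simp only [List.foldl_cons]
    refine ih _ ?_
    unfold bplStep
    by_cases hc : c = ""
    · simp only [if_pos hc]; exact h
    · simp only [if_neg hc]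
      rw [PySem.Dict.keys_foldl_modify]
      exact PySem.Set.nodup_update _ _ h

theorem bpl_empty_keys : (PySem.Dict.empty : PySem.Dict Int (List String)).keys = ([] : List Int) := rfl

theorem bpl_empty_getD (k : Int) : (PySem.Dict.empty : PySem.Dict Int (List String)).getD k [] = [] := rfl

theorem bpl_empty_keys_nodup : (PySem.Dict.empty : PySem.Dict Int (List String)).keys.Nodup :=
  bpl_empty_keys ▸ List.nodup_nil

theorem bpl_empty_getD_nodup : ∀ k : Int, ((PySem.Dict.empty : PySem.Dict Int (List String)).getD k []).Nodup :=
  fun k => bpl_empty_getD k ▸ List.nodup_nil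

-- the heart of the nonempty case: B's sorted-keys map equals A's range map, given a bound MCL
-- that caps every per-code level range and is attained
theorem bpl_core (fc : List String) (ml : Option Int) (MCL : Int)
    (H1 : ∀ c, c ∈ fc → c ≠ "" → bplCap ml c ≤ MCL)
    (H2 : ∀ l : Int, 1 ≤ l → l ≤ MCL → ∃ c, (c ∈ fc ∧ c ≠ "") ∧ l ≤ bplCap ml c)
    (H3 : ∀ (c : String) (l : Int), c ∈ fc → c ≠ "" → 1 ≤ l → l ≤ MCL →
      (l ≤ bplCap ml c ↔ l ≤ PySem.Str.len c)) :
    (PySem.List.sorted (fc.foldl (bplStep ml) PySem.Dict.empty).keys (fun x => x)).map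
        (fun l => (l, PySem.List.sorted ((fc.foldl (bplStep ml) PySem.Dict.empty).getD l []) (fun x => x)))
      = (PySem.List.pyRange 1 (MCL + 1)).map (fun l =>
          (l, PySem.List.sorted
            (PySem.Set.ofList
              (((PySem.List.sorted (PySem.Set.ofList (fc.filter (fun c => !(c == "")))) (fun x => x)).filter
                  (fun c => decide (l ≤ PySem.Str.len c))).map
                (fun c => PySem.Str.slice c none (some l))))
            (fun x => x))) := by
  have hmemN : ∀ c : String,
      c ∈ PySem.List.sorted (PySem.Set.ofList (fc.filter (fun c => !(c == "")))) (fun x => x)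
        ↔ c ∈ fc ∧ c ≠ "" := by
    intro c
    rw [PySem.List.mem_sorted, PySem.Set.mem_ofList, List.mem_filter]
    simp
  have hkeys : PySem.List.sorted (fc.foldl (bplStep ml) PySem.Dict.empty).keys (fun x => x)
      = PySem.List.pyRange 1 (MCL + 1) := by
    apply PySem.List.sorted_eq_of_perm_of_pairwise_lt
    · refine (List.perm_ext_iff_of_nodup (PySem.List.nodup_pyRange_one _ _)
        (bpl_keys_nodup fc ml PySem.Dict.empty bpl_empty_keys_nodup)).mpr (fun l => ?_)
      rw [PySem.List.mem_pyRange_one, bpl_keys_mem]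
      constructor
      · rintro ⟨h1, h2⟩
        obtain ⟨c, ⟨hc, hne⟩, hcap⟩ := H2 l h1 (by omega)
        exact Or.inr ⟨c, hc, hne, h1, hcap⟩
      · rintro (h | ⟨c, hc, hne, h1, hcap⟩)
        · rw [bpl_empty_keys] at h
          exact absurd h (List.not_mem_nil)
        · exact ⟨h1, by have := H1 c hc hne; omega⟩
    · exact PySem.List.pairwise_lt_pyRange_one _ _
  rw [hkeys]
  apply List.map_congr_left
  intro l hl
  rw [PySem.List.mem_pyRange_one] at hl
  have h1 : 1 ≤ l := hl.1
  have h2 : l ≤ MCL := by omega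
  refine congrArg (Prod.mk l) ?_
  apply PySem.List.sorted_eq_sorted_of_perm _ _ _ (fun a b h => h)
  refine (List.perm_ext_iff_of_nodup (bpl_outer_nodup fc ml PySem.Dict.empty bpl_empty_getD_nodup l)
    (PySem.Set.nodup_ofList _)).mpr (fun x => ?_)
  rw [bpl_outer_mem, PySem.Set.mem_ofList, List.mem_map]
  constructor
  · rintro (hx | ⟨c, hc, hne, _, hcap, rfl⟩)
    · rw [bpl_empty_getD] at hx
      exact absurd hx (List.not_mem_nil)
    · refine ⟨c, ?_, rfl⟩
      rw [List.mem_filter]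
      exact ⟨(hmemN c).2 ⟨hc, hne⟩,
        decide_eq_true ((H3 c l hc hne h1 h2).1 hcap)⟩
  · rintro ⟨c, hcfil, rfl⟩
    rw [List.mem_filter] at hcfil
    obtain ⟨hcN, hlen⟩ := hcfil
    obtain ⟨hcfc, hne⟩ := (hmemN c).1 hcN
    have hlc : l ≤ PySem.Str.len c := of_decide_eq_true hlen
    exact Or.inr ⟨c, hcfc, hne, h1, (H3 c l hcfc hne h1 h2).2 hlc, rfl⟩

-- ===== VERDICT (by name: the statement is the Claim_ definition above) =====
theorem build_prefixes_by_level_spec : Claim_equal_build_prefixes_by_level := by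
  intro fc ml _
  show build_prefixes_by_level fc ml = build_prefixes_by_level_alt fc ml
  simp only [build_prefixes_by_level, build_prefixes_by_level_alt]
  have hmemN : ∀ c : String,
      c ∈ PySem.List.sorted (PySem.Set.ofList (fc.filter (fun c => !(c == "")))) (fun x => x)
        ↔ c ∈ fc ∧ c ≠ "" := by
    intro c
    rw [PySem.List.mem_sorted, PySem.Set.mem_ofList, List.mem_filter]
    simp
  by_cases h0 : PySem.List.sorted (PySem.Set.ofList (fc.filter (fun c => !(c == "")))) (fun x => x) = []
  · -- every code is the empty string: both sides are []
    have hkeys : (fc.foldl (bplStep ml) PySem.Dict.empty).keys = [] := by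
      rw [List.eq_nil_iff_forall_not_mem]
      intro l hl
      rw [bpl_keys_mem] at hl
      rcases hl with h | ⟨c, hc, hne, _⟩
      · rw [bpl_empty_keys] at h
        exact absurd h (List.not_mem_nil)
      · have : c ∈ PySem.List.sorted (PySem.Set.ofList (fc.filter (fun c => !(c == "")))) (fun x => x) :=
          (hmemN c).2 ⟨hc, hne⟩
        rw [h0] at this
        exact absurd this (List.not_mem_nil)
    rw [if_pos h0, hkeys]
    rfl
  · rw [if_neg h0]
    obtain ⟨m, hm⟩ : ∃ m, PySem.List.max?
        ((PySem.List.sorted (PySem.Set.ofList (fc.filter (fun c => !(c == "")))) (fun x => x)).map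
          (fun c => PySem.Str.len c)) (fun x => x) = some m := by
      cases hx : PySem.List.max?
          ((PySem.List.sorted (PySem.Set.ofList (fc.filter (fun c => !(c == "")))) (fun x => x)).map
            (fun c => PySem.Str.len c)) (fun x => x) with
      | none =>
        rw [PySem.List.max?_eq_none_iff, List.map_eq_nil_iff] at hx
        exact absurd hx h0
      | some m => exact ⟨m, rfl⟩
    have hmax : ∀ c, c ∈ fc → c ≠ "" → PySem.Str.len c ≤ m := by
      intro c hc hne
      exact PySem.List.max?_isMax hm _ (List.mem_map.mpr ⟨c, (hmemN c).2 ⟨hc, hne⟩, rfl⟩)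
    have hattain : ∃ c0, (c0 ∈ fc ∧ c0 ≠ "") ∧ PySem.Str.len c0 = m := by
      have hmm := PySem.List.max?_mem hm
      rw [List.mem_map] at hmm
      obtain ⟨c0, hc0, hlen⟩ := hmm
      exact ⟨c0, (hmemN c0).1 hc0, hlen⟩
    rw [hm, Option.getD_some]
    rcases ml with _ | v
    · refine Eq.symm (bpl_core fc none m ?_ ?_ ?_)
      · intro c hc hne
        exact hmax c hc hne
      · intro l h1 h2
        obtain ⟨c0, hc0, hlen⟩ := hattain
        refine ⟨c0, hc0, ?_⟩
        show l ≤ PySem.Str.len c0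
        omega
      · intro c l _ _ _ _
        exact Iff.rfl
    · refine Eq.symm (bpl_core fc (some v) (min m v) ?_ ?_ ?_)
      · intro c hc hne
        have := hmax c hc hne
        show min (PySem.Str.len c) v ≤ min m v
        omega
      · intro l h1 h2
        obtain ⟨c0, hc0, hlen⟩ := hattain
        refine ⟨c0, hc0, ?_⟩
        show l ≤ min (PySem.Str.len c0) v
        omega
      · intro c l hc hne h1 h2
        show l ≤ min (PySem.Str.len c) v ↔ l ≤ PySem.Str.len c
        constructor
        · intro h; omega
        · intro h; omega
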